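-- pv_equiv track=rewrite | github.com/ralksta/arcade-video-scanner | arcade_scanner/scanner/image_inspector.py | _parse_batch_sips_output
-- ===== SOURCE A (Python) =====
-- from typing import Optional, Dict, List, Tuple
--
-- def _parse_batch_sips_output(output: str) -> Dict[str, Dict[str, str]]:
--     """
--     Parse multi-file sips output. Each file section starts with the filepath:
--
--     /path/to/file1.png
--       pixelWidth: 1920
--       pixelHeight: 1080
--       format: png
--     /path/to/file2.jpg
--       pixelWidth: 3840
--       pixelHeight: 2160
--       format: jpeg
--     """
--     result = {}
--     current_file = None
--     current_props = {}
--
--     for line in output.strip().split('\n'):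
--         stripped = line.strip()
--         if not stripped:
--             continue
--
--         # Property lines have "key: value" format with leading whitespace
--         if ': ' in line and (line.startswith('  ') or line.startswith('\t')):
--             parts = stripped.split(': ', 1)
--             if len(parts) == 2:
--                 current_props[parts[0]] = parts[1]
--         else:
--             # This is a filepath line — save previous file's props
--             if current_file and current_props:
--                 result[current_file] = current_props
--             current_file = stripped
--             current_props = {}
--
--     # Don't forget the last file
--     if current_file and current_props:
--         result[current_file] = current_props
--
--     return result
-- ===== SOURCE B (Python) =====
-- def _parse_batch_sips_output(output: str):
--     def is_prop(line):
--         return ': ' in line and (line.startswith('  ') or line.startswith('\t'))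
--
--     lines = [ln for ln in output.strip().split('\n') if ln.strip()]
--     n = len(lines)
--     result = {}
--     i = 0
--     # discard leading property lines that precede any header
--     while i < n and is_prop(lines[i]):
--         i += 1
--     while i < n:
--         header = lines[i].strip()
--         i += 1
--         props = {}
--         while i < n and is_prop(lines[i]):
--             parts = lines[i].strip().split(': ', 1)
--             if len(parts) == 2:
--                 props[parts[0]] = parts[1]
--             i += 1
--         if props:
--             result[header] = props
--     return result
-- ===== Notes on version B (the rewrite author's own statement) =====
-- stated objective: alternative
-- what changed: Replaces A's single-pass state machine (current_file/current_props mutated per line with an end-of-loop flush) by an index-based section scanner: filter blank lines once, skip leading property lines, then repeatedly take a header and consume its consecutive property lines with an inner scan.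
import Mathlib
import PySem

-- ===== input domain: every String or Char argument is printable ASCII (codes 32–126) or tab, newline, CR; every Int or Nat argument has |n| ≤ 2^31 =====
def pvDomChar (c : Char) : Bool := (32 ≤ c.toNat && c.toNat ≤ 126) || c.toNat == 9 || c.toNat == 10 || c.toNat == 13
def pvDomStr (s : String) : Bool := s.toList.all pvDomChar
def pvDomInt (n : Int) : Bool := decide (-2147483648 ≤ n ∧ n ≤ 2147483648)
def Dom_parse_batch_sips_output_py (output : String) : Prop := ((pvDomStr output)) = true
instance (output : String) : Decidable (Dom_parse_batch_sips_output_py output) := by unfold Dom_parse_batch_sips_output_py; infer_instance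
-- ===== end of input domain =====

-- B is an alternative decomposition of the same parse: instead of A's running state machine,
-- it filters blank lines, skips leading property lines, and scans header-by-header sections.

-- shared helper (both Pythons classify a property line with this exact test)
def pvIsProp (line : String) : Bool :=
  PySem.Str.isIn ": " line && (PySem.Str.startswith line "  " || PySem.Str.startswith line "\t")

-- shared helper: parts = stripped.split(': ', 1); if len(parts) == 2: props[parts[0]] = parts[1]
def pvAddProp (props : PySem.Dict String String) (line : String) : PySem.Dict String String :=
  match (PySem.Str.splitMax? (PySem.Str.strip line) ": " 1).getD [] with
  | [k, v] => props.insert k v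
  | _ => props

-- ===== PORT A =====
def pvAStep
    (st : PySem.Dict String (PySem.Dict String String) × Option String × PySem.Dict String String)
    (line : String) :
    PySem.Dict String (PySem.Dict String String) × Option String × PySem.Dict String String :=
  let stripped := PySem.Str.strip line
  if stripped = "" then st
  else if pvIsProp line then
    (st.1, st.2.1, pvAddProp st.2.2 line)
  else
    let result' :=
      match st.2.1 with
      | some f => if f ≠ "" ∧ (st.2.2).items ≠ [] then st.1.insert f st.2.2 else st.1
      | none => st.1
    (result', some stripped, PySem.Dict.empty)

-- the final "don't forget the last file" flush of A
def pvAFin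
    (st : PySem.Dict String (PySem.Dict String String) × Option String × PySem.Dict String String) :
    PySem.Dict String (PySem.Dict String String) :=
  match st.2.1 with
  | some f => if f ≠ "" ∧ (st.2.2).items ≠ [] then st.1.insert f st.2.2 else st.1
  | none => st.1

def parse_batch_sips_output_py (output : String) : List (String × List (String × String)) :=
  let lines := (PySem.Str.split? (PySem.Str.strip output) "\n").getD []
  let st := lines.foldl pvAStep (PySem.Dict.empty, none, PySem.Dict.empty)
  (pvAFin st).items.map (fun p => (p.1, p.2.items))

-- ===== PORT B =====
-- the inner while: consecutive property lines parsed into a dict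
def pvParseProps (plines : List String) : PySem.Dict String String :=
  plines.foldl pvAddProp PySem.Dict.empty

-- the outer while: header, then its property block, then the rest
def pvBRun : List String → PySem.Dict String (PySem.Dict String String) →
    PySem.Dict String (PySem.Dict String String)
  | [], result => result
  | h :: rest, result =>
    let props := pvParseProps (rest.takeWhile pvIsProp)
    let result' := if props.items ≠ [] then result.insert (PySem.Str.strip h) props else result
    pvBRun (rest.dropWhile pvIsProp) result'
  termination_by l _ => l.length
  decreasing_by
    simpa using Nat.lt_succ_of_le (List.length_dropWhile_le pvIsProp rest)

def parse_batch_sips_output_py_alt (output : String) : List (String × List (String × String)) :=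
  let lines := ((PySem.Str.split? (PySem.Str.strip output) "\n").getD []).filter
    (fun ln => PySem.Str.strip ln != "")
  (pvBRun (lines.dropWhile pvIsProp) PySem.Dict.empty).items.map (fun p => (p.1, p.2.items))

-- ===== PRECONDITION & SPEC =====
def Spec_parse_batch_sips_output_py (output : String) (out : List (String × List (String × String))) : Prop := out = parse_batch_sips_output_py_alt output
instance (output : String) (out : List (String × List (String × String))) : Decidable (Spec_parse_batch_sips_output_py output out) := by unfold Spec_parse_batch_sips_output_py; infer_instance

-- ===== CLAIM (what is proved, stated in full; the proofs are below) =====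
def Claim_equal_parse_batch_sips_output_py : Prop := ∀ (output : String), Dom_parse_batch_sips_output_py output → Spec_parse_batch_sips_output_py output (parse_batch_sips_output_py output)

-- ===== LEMMAS AND PROOFS =====

lemma pvBRun_nil (res : PySem.Dict String (PySem.Dict String String)) :
    pvBRun [] res = res := by
  rw [pvBRun.eq_def]

lemma pvBRun_cons (h : String) (rest : List String)
    (res : PySem.Dict String (PySem.Dict String String)) :
    pvBRun (h :: rest) res =
      pvBRun (rest.dropWhile pvIsProp)
        (let props := pvParseProps (rest.takeWhile pvIsProp)
         if props.items ≠ [] then res.insert (PySem.Str.strip h) props else res) := by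
  rw [pvBRun.eq_def]

-- A's step ignores lines whose strip is empty, so folding over the filtered list is the same
lemma pvA_fold_filter (lines : List String)
    (st : PySem.Dict String (PySem.Dict String String) × Option String × PySem.Dict String String) :
    lines.foldl pvAStep st =
      (lines.filter (fun ln => PySem.Str.strip ln != "")).foldl pvAStep st := by
  induction lines generalizing st with
  | nil => rfl
  | cons x xs ih =>
    by_cases hx : PySem.Str.strip x = ""
    · simp [hx, pvAStep, ih]
    · simp [hx, ih]

-- A's run from an open section (some f, f ≠ "") equals: flush the section's span, continue with B
lemma pvA_some (L : List String) :
    ∀ (res : PySem.Dict String (PySem.Dict String String)) (f : String)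
      (cp : PySem.Dict String String),
      f ≠ "" → (∀ ln ∈ L, PySem.Str.strip ln ≠ "") →
      pvAFin (L.foldl pvAStep (res, some f, cp)) =
        pvBRun (L.dropWhile pvIsProp)
          (let props := (L.takeWhile pvIsProp).foldl pvAddProp cp
           if props.items ≠ [] then res.insert f props else res) := by
  induction L with
  | nil =>
    intro res f cp hf _
    simp [pvAFin, pvBRun_nil, hf]
  | cons x xs ih =>
    intro res f cp hf hall
    have hx : PySem.Str.strip x ≠ "" := hall x (List.mem_cons_self ..)
    have hxs : ∀ ln ∈ xs, PySem.Str.strip ln ≠ "" := fun ln h => hall ln (List.mem_cons_of_mem _ h)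
    by_cases hp : pvIsProp x = true
    · simp only [List.foldl_cons, pvAStep, if_neg hx, hp, if_true]
      rw [ih res f (pvAddProp cp x) hf hxs]
      simp [hp]
    · simp only [List.foldl_cons, pvAStep, if_neg hx, hp, Bool.false_eq_true, if_false]
      rw [ih _ (PySem.Str.strip x) PySem.Dict.empty hx hxs]
      simp only [List.takeWhile_cons, List.dropWhile_cons, hp, Bool.false_eq_true, if_false]
      rw [pvBRun_cons]
      simp [hf, pvParseProps]

-- A's run before any header was seen: leading property lines fall away, the first header opens B
lemma pvA_none (L : List String) :
    ∀ (res : PySem.Dict String (PySem.Dict String String)) (cp : PySem.Dict String String),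
      (∀ ln ∈ L, PySem.Str.strip ln ≠ "") →
      pvAFin (L.foldl pvAStep (res, none, cp)) = pvBRun (L.dropWhile pvIsProp) res := by
  induction L with
  | nil => intro res cp _; simp [pvAFin, pvBRun_nil]
  | cons x xs ih =>
    intro res cp hall
    have hx : PySem.Str.strip x ≠ "" := hall x (List.mem_cons_self ..)
    have hxs : ∀ ln ∈ xs, PySem.Str.strip ln ≠ "" := fun ln h => hall ln (List.mem_cons_of_mem _ h)
    by_cases hp : pvIsProp x = true
    · simp only [List.foldl_cons, pvAStep, if_neg hx, hp, if_true]
      rw [ih res (pvAddProp cp x) hxs]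
      simp [hp]
    · simp only [List.foldl_cons, pvAStep, if_neg hx, hp, Bool.false_eq_true, if_false]
      rw [pvA_some xs res (PySem.Str.strip x) PySem.Dict.empty hx hxs]
      simp only [List.dropWhile_cons, hp, Bool.false_eq_true, if_false]
      rw [pvBRun_cons]
      simp [pvParseProps]

-- ===== VERDICT (by name: the statement is the Claim_ definition above) =====
theorem parse_batch_sips_output_py_spec : Claim_equal_parse_batch_sips_output_py := by
  intro output _
  show parse_batch_sips_output_py output = parse_batch_sips_output_py_alt output
  unfold parse_batch_sips_output_py parse_batch_sips_output_py_alt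
  dsimp only
  rw [pvA_fold_filter]
  rw [pvA_none]
  intro ln hln
  have := List.of_mem_filter hln
  simpa using this
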